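-- pv_equiv track=rewrite | github.com/JuBoks/Coding-Test | 완전탐색/PGM_42840_모의고사.py | solution_before
-- ===== SOURCE A (Python) =====
-- def solution_before(answers):
--   answer = []
--   p1 = [1, 2, 3, 4, 5]
--   p2 = [2, 1, 2, 3, 2, 4, 2, 5]
--   p3 = [3, 3, 1, 1, 2, 2, 4, 4, 5, 5]
--
--   # 1. score 를 배열로 관리
--   score1 = 0
--   score2 = 0
--   score3 = 0
--
--   for i in range(len(answers)):
--       i1 = i % 5
--       i2 = i % 8
--       i3 = i % 10
--       if answers[i] == p1[i1]:
--           score1 += 1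
--       if answers[i] == p2[i2]:
--           score2 += 1
--       if answers[i] == p3[i3]:
--           score3 += 1
--
--   # 2. enumberate 를 for 를 사용하여 루프돌기
--   scores = [score1, score2, score3]
--   max_score = max(scores)
--   scores = list(enumerate(scores, start=1))
--   scores = list(filter(lambda x: x[1] == max_score, scores))
--   scores.sort(key=lambda x: x[1])
--   answer = list(map(lambda x: x[0], scores))
--
--   return answer
-- ===== SOURCE B (Python) =====
-- def solution_before(answers):
--     patterns = [[1, 2, 3, 4, 5],
--                 [2, 1, 2, 3, 2, 4, 2, 5],
--                 [3, 3, 1, 1, 2, 2, 4, 4, 5, 5]]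
--     # One pass: histogram of (position mod 40, answer) pairs -- 40 is the common
--     # period of the three patterns, so the histogram determines all three scores.
--     counts = {}
--     for i, a in enumerate(answers):
--         key = (i % 40, a)
--         counts[key] = counts.get(key, 0) + 1
--     # Each supervisor's score is 40 table lookups, no rescan of answers.
--     scores = [sum(counts.get((r, p[r % len(p)]), 0) for r in range(40))
--               for p in patterns]
--     best = max(scores)
--     return [j + 1 for j, s in enumerate(scores) if s == best]
-- ===== Notes on version B (the rewrite author's own statement) =====
-- stated objective: alternative
-- what changed: A keeps three running score counters and compares every answer against all three patterns inside one fused scan, then filters/sorts an enumerated score list; B instead builds a frequency table keyed by (position mod 40, answer) in a single pass and derives each supervisor's score from 40 table lookups (40 = common period of the patterns), then returns the argmax indices by a direct comprehension.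
import Mathlib
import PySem

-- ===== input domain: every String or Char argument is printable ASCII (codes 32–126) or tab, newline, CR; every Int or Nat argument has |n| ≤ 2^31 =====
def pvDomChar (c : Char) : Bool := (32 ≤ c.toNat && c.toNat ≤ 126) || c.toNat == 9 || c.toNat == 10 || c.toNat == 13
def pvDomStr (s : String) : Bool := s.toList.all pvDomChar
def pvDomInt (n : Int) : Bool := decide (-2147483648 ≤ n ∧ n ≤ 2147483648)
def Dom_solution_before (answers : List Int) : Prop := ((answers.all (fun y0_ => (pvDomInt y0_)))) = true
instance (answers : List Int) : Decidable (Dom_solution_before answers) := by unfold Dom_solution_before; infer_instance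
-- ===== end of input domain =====

-- B replaces A's fused scan (three score counters updated per element, then an
-- enumerate/filter/sort/map pipeline) by a one-pass frequency table keyed by
-- (position mod 40, answer) — 40 is the common period of the three patterns —
-- from which each supervisor's score is 40 table lookups (objective: alternative).

-- ===== PORT A =====
def pA1 : List Int := [1, 2, 3, 4, 5]
def pA2 : List Int := [2, 1, 2, 3, 2, 4, 2, 5]
def pA3 : List Int := [3, 3, 1, 1, 2, 2, 4, 4, 5, 5]

-- loop body of A's single for-loop over range(len(answers)); state = (score1, score2, score3)
def stepA (answers : List Int) (s : Int × Int × Int) (i : Int) : Int × Int × Int :=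
  let i1 := PySem.Int.mod i 5
  let i2 := PySem.Int.mod i 8
  let i3 := PySem.Int.mod i 10
  let a := PySem.List.pyGetD answers i 0   -- answers[i]; i is always in range here
  let s1 := if a = PySem.List.pyGetD pA1 i1 0 then s.1 + 1 else s.1
  let s2 := if a = PySem.List.pyGetD pA2 i2 0 then s.2.1 + 1 else s.2.1
  let s3 := if a = PySem.List.pyGetD pA3 i3 0 then s.2.2 + 1 else s.2.2
  (s1, s2, s3)

def solution_before (answers : List Int) : List Int :=
  let s := (PySem.List.pyRange 0 (answers.length : Int) 1).foldl (stepA answers) (0, 0, 0)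
  let scores : List Int := [s.1, s.2.1, s.2.2]
  let max_score : Int := (PySem.List.max? scores (fun x => x)).getD 0   -- max(scores); list is never empty
  let pairs := (PySem.List.enumerate scores 1).filter (fun x => x.2 == max_score)
  let sortedPairs := PySem.List.sorted pairs (fun x => x.2) false
  sortedPairs.map (fun x => x.1)

-- ===== PORT B =====
-- the counts dict: counts[(i % 40, a)] = counts.get((i % 40, a), 0) + 1 over enumerate(answers)
def histB (answers : List Int) : PySem.Dict (Int × Int) Int :=
  (PySem.List.enumerate answers 0).foldl
    (fun d x =>
      d.insert (PySem.Int.mod x.1 40, x.2) (d.getD (PySem.Int.mod x.1 40, x.2) 0 + 1))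
    PySem.Dict.empty

-- sum(counts.get((r, p[r % len(p)]), 0) for r in range(40))
def scoreHist (counts : PySem.Dict (Int × Int) Int) (p : List Int) : Int :=
  (PySem.List.pyRange 0 40 1).foldl
    (fun acc r => acc + counts.getD (r, PySem.List.pyGetD p (PySem.Int.mod r (p.length : Int)) 0) 0)
    0

def solution_before_alt (answers : List Int) : List Int :=
  let patterns : List (List Int) :=
    [[1, 2, 3, 4, 5], [2, 1, 2, 3, 2, 4, 2, 5], [3, 3, 1, 1, 2, 2, 4, 4, 5, 5]]
  let counts := histB answers
  let scores := patterns.map (fun p => scoreHist counts p)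
  let best : Int := (PySem.List.max? scores (fun x => x)).getD 0   -- max(scores); list is never empty
  ((PySem.List.enumerate scores 0).filter (fun x => x.2 == best)).map (fun x => x.1 + 1)

-- ===== PRECONDITION & SPEC =====
def Spec_solution_before (answers : List Int) (out : List Int) : Prop := out = solution_before_alt answers
instance (answers : List Int) (out : List Int) : Decidable (Spec_solution_before answers out) := by unfold Spec_solution_before; infer_instance

-- ===== CLAIM (what is proved, stated in full; the proofs are below) =====
def Claim_equal_solution_before : Prop := ∀ (answers : List Int), Dom_solution_before answers → Spec_solution_before answers (solution_before answers)

-- ===== LEMMAS AND PROOFS =====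

-- collapsing mod 40 before a divisor of 40 changes nothing
theorem modmod (x L : Int) (hL0 : 0 < L) (hdvd : L ∣ 40) :
    PySem.Int.mod (PySem.Int.mod x 40) L = PySem.Int.mod x L := by
  rw [PySem.Int.mod_eq_emod_of_pos (by norm_num : (0:Int) < 40),
    PySem.Int.mod_eq_emod_of_pos hL0, PySem.Int.mod_eq_emod_of_pos hL0,
    Int.emod_emod_of_dvd x hdvd]

-- the empty histogram scores 0 against every pattern
theorem scoreHist_empty (p : List Int) : scoreHist PySem.Dict.empty p = 0 := by
  unfold scoreHist
  rw [PySem.List.foldl_add]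
  simp [PySem.Dict.getD_empty]

-- adding one element to the histogram shifts a pattern's score by the match indicator
theorem scoreHist_insert (d : PySem.Dict (Int × Int) Int) (m a : Int)
    (hm0 : 0 ≤ m) (hm : m < 40) (p : List Int) :
    scoreHist (d.insert (m, a) (d.getD (m, a) 0 + 1)) p =
      scoreHist d p +
        (if a = PySem.List.pyGetD p (PySem.Int.mod m (p.length : Int)) 0 then 1 else 0) := by
  unfold scoreHist
  rw [PySem.List.foldl_add, PySem.List.foldl_add]
  have hpoint : ∀ r : Int,
      (d.insert (m, a) (d.getD (m, a) 0 + 1)).getD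
          (r, PySem.List.pyGetD p (PySem.Int.mod r (p.length : Int)) 0) 0 =
        d.getD (r, PySem.List.pyGetD p (PySem.Int.mod r (p.length : Int)) 0) 0 +
          (if (r, PySem.List.pyGetD p (PySem.Int.mod r (p.length : Int)) 0) = (m, a)
           then 1 else 0) := by
    intro r
    rw [PySem.Dict.getD_insert]
    by_cases h : (r, PySem.List.pyGetD p (PySem.Int.mod r (p.length : Int)) 0) = (m, a)
    · simp only [h]
      have : (m, a) = (r, PySem.List.pyGetD p (PySem.Int.mod r (p.length : Int)) 0) := h.symm
      rw [this]; simp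
    · simp [h]
  have hmap :
      ((PySem.List.pyRange 0 40 1).map fun r =>
          (d.insert (m, a) (d.getD (m, a) 0 + 1)).getD
            (r, PySem.List.pyGetD p (PySem.Int.mod r (p.length : Int)) 0) 0) =
        (PySem.List.pyRange 0 40 1).map fun r =>
          d.getD (r, PySem.List.pyGetD p (PySem.Int.mod r (p.length : Int)) 0) 0 +
            (if (r, PySem.List.pyGetD p (PySem.Int.mod r (p.length : Int)) 0) = (m, a)
             then 1 else 0) :=
    List.map_congr_left (fun r _ => hpoint r)
  rw [hmap, List.sum_map_add]
  -- the indicator sums to 1 iff the new element matches the pattern at its slot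
  have hsplit : PySem.List.pyRange 0 40 1 =
      PySem.List.pyRange 0 m 1 ++ m :: PySem.List.pyRange (m + 1) 40 1 := by
    rw [PySem.List.pyRange_one_append 0 m 40 hm0 (le_of_lt hm),
      PySem.List.pyRange_one_cons hm]
  have hleft : ((PySem.List.pyRange 0 m 1).map fun r =>
      (if (r, PySem.List.pyGetD p (PySem.Int.mod r (p.length : Int)) 0) = (m, a)
       then (1:Int) else 0)).sum = 0 := by
    apply List.sum_eq_zero
    intro x hx
    simp only [List.mem_map] at hx
    obtain ⟨r, hr, hxe⟩ := hx
    have : r < m := (PySem.List.mem_pyRange_one.mp hr).2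
    have hne : (r, PySem.List.pyGetD p (PySem.Int.mod r (p.length : Int)) 0) ≠ (m, a) := by
      intro hcontra; exact absurd (congrArg Prod.fst hcontra) (by simp; omega)
    rw [if_neg hne] at hxe; exact hxe.symm
  have hright : ((PySem.List.pyRange (m + 1) 40 1).map fun r =>
      (if (r, PySem.List.pyGetD p (PySem.Int.mod r (p.length : Int)) 0) = (m, a)
       then (1:Int) else 0)).sum = 0 := by
    apply List.sum_eq_zero
    intro x hx
    simp only [List.mem_map] at hx
    obtain ⟨r, hr, hxe⟩ := hx
    have : m + 1 ≤ r := (PySem.List.mem_pyRange_one.mp hr).1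
    have hne : (r, PySem.List.pyGetD p (PySem.Int.mod r (p.length : Int)) 0) ≠ (m, a) := by
      intro hcontra; exact absurd (congrArg Prod.fst hcontra) (by simp; omega)
    rw [if_neg hne] at hxe; exact hxe.symm
  rw [hsplit]
  simp only [List.map_append, List.map_cons, List.sum_append, List.sum_cons, hleft, hright]
  by_cases hmatch : a = PySem.List.pyGetD p (PySem.Int.mod m (p.length : Int)) 0
  · rw [if_pos (by rw [hmatch]), if_pos hmatch]; ring
  · rw [if_neg (by intro hc; exact hmatch (congrArg Prod.snd hc).symm), if_neg hmatch]; ring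

-- extending the scanned prefix by one element inserts one histogram increment
theorem hist_take_succ (answers : List Int) (n : Nat) (hn : n < answers.length) :
    histB (answers.take (n + 1)) =
      (histB (answers.take n)).insert (PySem.Int.mod (n : Int) 40, answers[n])
        ((histB (answers.take n)).getD (PySem.Int.mod (n : Int) 40, answers[n]) 0 + 1) := by
  unfold histB
  rw [List.take_add_one, List.getElem?_eq_getElem hn]
  simp only [Option.toList_some, PySem.List.enumerate_append, List.foldl_append]
  simp [PySem.List.enumerate_cons, List.length_take, Nat.min_eq_left (Nat.le_of_lt hn)]

-- A's fused loop over the first n indices computes exactly B's three histogram scores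
theorem foldA_eq (answers : List Int) :
    ∀ n : Nat, n ≤ answers.length →
      (PySem.List.pyRange 0 (n : Int) 1).foldl (stepA answers) (0, 0, 0) =
        (scoreHist (histB (answers.take n)) pA1,
         scoreHist (histB (answers.take n)) pA2,
         scoreHist (histB (answers.take n)) pA3) := by
  intro n
  induction n with
  | zero =>
    intro _
    simp [histB, PySem.List.enumerate_nil, scoreHist_empty]
  | succ k ih =>
    intro hk
    have hkl : k < answers.length := Nat.lt_of_succ_le hk
    have hcast : ((k + 1 : Nat) : Int) = (k : Int) + 1 := by push_cast; ring
    rw [hcast, PySem.List.pyRange_one_succ_right (by positivity), List.foldl_append,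
      ih (Nat.le_of_lt hkl)]
    have hm0 : (0:Int) ≤ PySem.Int.mod (k : Int) 40 :=
      PySem.Int.mod_nonneg _ (by norm_num)
    have hm40 : PySem.Int.mod (k : Int) 40 < 40 :=
      PySem.Int.mod_lt _ (by norm_num)
    rw [hist_take_succ answers k hkl,
      scoreHist_insert _ _ _ hm0 hm40 pA1, scoreHist_insert _ _ _ hm0 hm40 pA2,
      scoreHist_insert _ _ _ hm0 hm40 pA3,
      modmod (k : Int) _ (by norm_num [pA1]) (by norm_num [pA1]),
      modmod (k : Int) _ (by norm_num [pA2]) (by norm_num [pA2]),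
      modmod (k : Int) _ (by norm_num [pA3]) (by norm_num [pA3])]
    simp only [List.foldl_cons, List.foldl_nil]
    unfold stepA
    simp [pA1, pA2, pA3, List.getElem?_eq_getElem hkl, PySem.List.pyGetD]
    refine ⟨by split_ifs <;> ring, by split_ifs <;> ring, by split_ifs <;> ring⟩

-- the stable sort by score of a list whose kept elements all carry the same score is the identity
theorem sorted_filter_eq (L : List (Int × Int)) (m : Int) :
    PySem.List.sorted (L.filter (fun x => x.2 == m)) (fun x => x.2) false =
      L.filter (fun x => x.2 == m) := by
  apply PySem.List.sorted_eq_self_of_pairwise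
  apply List.pairwise_of_forall_mem_list
  intro a ha b hb
  simp only [List.mem_filter, beq_iff_eq] at ha hb
  simp [ha.2, hb.2]

-- A's enumerate(start=1)/filter/sort/map pipeline equals B's comprehension, for any three scores
theorem post_eq (s1 s2 s3 : Int) :
    (PySem.List.sorted
        ((PySem.List.enumerate [s1, s2, s3] 1).filter
          (fun x => x.2 == (PySem.List.max? [s1, s2, s3] (fun x => x)).getD 0))
        (fun x => x.2) false).map (fun x => x.1) =
      ((PySem.List.enumerate [s1, s2, s3] 0).filter
          (fun x => x.2 == (PySem.List.max? [s1, s2, s3] (fun x => x)).getD 0)).map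
        (fun x => x.1 + 1) := by
  rw [sorted_filter_eq]
  simp only [PySem.List.enumerate_cons, PySem.List.enumerate_nil, List.filter]
  norm_num
  generalize (PySem.List.max? [s1, s2, s3] fun x => x).getD 0 = m
  cases h1 : s1 == m <;> cases h2 : s2 == m <;> cases h3 : s3 == m <;>
    simp_all

-- ===== VERDICT (by name: the statement is the Claim_ definition above) =====
theorem solution_before_spec : Claim_equal_solution_before := by
  intro answers _
  unfold Spec_solution_before solution_before solution_before_alt
  simp only [List.map_cons, List.map_nil]
  rw [foldA_eq answers answers.length le_rfl, List.take_length]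
  simpa [pA1, pA2, pA3] using
    post_eq (scoreHist (histB answers) pA1) (scoreHist (histB answers) pA2)
      (scoreHist (histB answers) pA3)
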